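-- pv_equiv track=rewrite | github.com/meanang123/prmax | prmax/prmax/utilities3/common/string.py | encodeforpostgres
-- ===== SOURCE A (Python) =====
-- _post_fields =  ( (u"%","\\%"),(u"?","\\?"),(u",","\,"),(u"'","''"))
--
-- def encodeforpostgres( data ) :
-- 	""" Encode the special characters of a string for postgress"""
-- 	def _encode( instring ) :
-- 		for f in _post_fields:
-- 			instring = instring.replace(f[0], f[1])
-- 		return instring
-- 	if type ( data ) in ( tuple, list ) :
-- 		return [ _encode( f ) for f in data ]
-- 	else:
-- 		return _encode ( data )
-- ===== SOURCE B (Python) =====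
-- _TABLE = str.maketrans({"%": "\\%", "?": "\\?", ",": "\\,", "'": "''"})
--
-- def encodeforpostgres(data):
--     """Encode the special characters of a string for postgres (single-pass translate)."""
--     if type(data) in (tuple, list):
--         return [f.translate(_TABLE) for f in data]
--     return data.translate(_TABLE)
-- ===== Notes on version B (the rewrite author's own statement) =====
-- stated objective: idiomatic
-- what changed: Replaces the four sequential str.replace passes with one table-driven str.translate pass over each string (safe because no replacement output contains a later pattern character).
import Mathlib
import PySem

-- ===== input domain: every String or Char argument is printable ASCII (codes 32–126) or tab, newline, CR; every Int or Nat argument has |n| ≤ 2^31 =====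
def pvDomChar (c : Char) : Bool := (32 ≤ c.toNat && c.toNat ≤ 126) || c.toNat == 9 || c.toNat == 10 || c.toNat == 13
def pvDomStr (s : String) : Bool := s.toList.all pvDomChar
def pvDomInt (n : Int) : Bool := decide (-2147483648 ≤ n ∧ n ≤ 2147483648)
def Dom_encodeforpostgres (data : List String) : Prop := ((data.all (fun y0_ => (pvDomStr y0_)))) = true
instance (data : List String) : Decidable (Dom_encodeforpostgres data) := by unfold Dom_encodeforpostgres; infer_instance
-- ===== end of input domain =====

-- B replaces A's four sequential replace passes by one char-at-a-time table translation (idiomatic single pass).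

-- ===== PORT A =====
def pvPostFields : List (String × String) :=
  [("%", "\\%"), ("?", "\\?"), (",", "\\,"), ("'", "''")]

def pvEncodeA (instring : String) : String :=
  pvPostFields.foldl (fun s f => PySem.Str.replace s f.1 f.2) instring

def encodeforpostgres (data : List String) : List String :=
  data.map pvEncodeA

-- ===== PORT B =====
-- translation table as a per-character function (str.translate)
def pvTr (c : Char) : List Char :=
  if c = '%' then ['\\', '%']
  else if c = '?' then ['\\', '?']
  else if c = ',' then ['\\', ',']
  else if c = '\'' then ['\'', '\'']
  else [c]

def pvEncodeB (instring : String) : String :=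
  String.ofList (instring.toList.flatMap pvTr)

def encodeforpostgres_alt (data : List String) : List String :=
  data.map pvEncodeB

-- ===== PRECONDITION & SPEC =====
def Spec_encodeforpostgres (data : List String) (out : List String) : Prop := out = encodeforpostgres_alt data
instance (data : List String) (out : List String) : Decidable (Spec_encodeforpostgres data out) := by unfold Spec_encodeforpostgres; infer_instance

-- ===== CLAIM (what is proved, stated in full; the proofs are below) =====
def Claim_equal_encodeforpostgres : Prop := ∀ (data : List String), Dom_encodeforpostgres data → Spec_encodeforpostgres data (encodeforpostgres data)

-- ===== LEMMAS AND PROOFS =====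

-- single-char pattern: replace is a flatMap over the characters
theorem go_single (c : Char) (r : List Char) :
    ∀ (l acc : List Char),
      PySem.Chars.replace.go [c] r l.length l acc
        = acc.reverse ++ l.flatMap (fun x => if x = c then r else [x]) := by
  intro l
  induction l with
  | nil => intro acc; simp [PySem.Chars.replace.go]
  | cons x t ih =>
      intro acc
      by_cases h : x = c
      · subst h
        simp [PySem.Chars.replace.go, List.isPrefixOf, ih]
      · have hpre : List.isPrefixOf [c] (x :: t) = false := by
          simp [List.isPrefixOf]
          intro hcx; exact absurd hcx.symm h
        simp [PySem.Chars.replace.go, hpre, ih, h]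

theorem replace_single (s : List Char) (c : Char) (r : List Char) :
    PySem.Chars.replace s [c] r = s.flatMap (fun x => if x = c then r else [x]) := by
  rw [PySem.Chars.replace]
  simp [go_single]

-- composing the four single-char replaces is the table translation
theorem four_pass_eq_tr (s : List Char) :
    ((((s.flatMap (fun x => if x = '%' then ['\\','%'] else [x])).flatMap
        (fun x => if x = '?' then ['\\','?'] else [x])).flatMap
        (fun x => if x = ',' then ['\\',','] else [x])).flatMap
        (fun x => if x = '\'' then ['\'','\''] else [x]))
      = s.flatMap pvTr := by
  simp only [List.flatMap_assoc]
  congr 1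
  funext c
  by_cases h1 : c = '%'
  · subst h1; decide
  · by_cases h2 : c = '?'
    · subst h2; decide
    · by_cases h3 : c = ','
      · subst h3; decide
      · by_cases h4 : c = '\''
        · subst h4; decide
        · simp [pvTr, h1, h2, h3, h4]

theorem encode_eq (s : String) : pvEncodeA s = pvEncodeB s := by
  unfold pvEncodeA pvEncodeB pvPostFields
  simp [List.foldl, PySem.Str.replace, replace_single, four_pass_eq_tr]

-- ===== VERDICT (by name: the statement is the Claim_ definition above) =====
theorem encodeforpostgres_spec : Claim_equal_encodeforpostgres := by
  intro data _
  unfold Spec_encodeforpostgres encodeforpostgres encodeforpostgres_alt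
  simp [encode_eq]
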